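-- pv_equiv track=rewrite | github.com/yusheng-ccnu/Classification-for-Chinese-QA | network/parse_word.py | word_n_grams
-- ===== SOURCE A (Python) =====
-- def word_n_grams(tokens, stop_words=None, ngram_range=(1, 1)):
--     # handle stop words
--     if stop_words is not None:
--         tokens = [w for w in tokens if w not in stop_words]
--
--         # handle token n-grams
--     min_n, max_n = ngram_range
--     if max_n != 1:
--         original_tokens = tokens
--         tokens = []
--         n_original_tokens = len(original_tokens)
--         for n in range(min_n, min(max_n + 1, n_original_tokens + 1)):
--             for i in range(n_original_tokens - n + 1):
--                 tokens.append("".join(original_tokens[i: i + n]))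
--     return tokens
-- ===== SOURCE B (Python) =====
-- def word_n_grams(tokens, stop_words=None, ngram_range=(1, 1)):
--     # handle stop words
--     if stop_words is not None:
--         tokens = [w for w in tokens if w not in stop_words]
--
--     # handle token n-grams: grow each level of grams from the previous one
--     min_n, max_n = ngram_range
--     if max_n == 1:
--         return tokens
--     result = []
--     current = list(tokens)  # grams of length 1
--     for n in range(1, min(max_n, len(tokens)) + 1):
--         if n >= min_n:
--             result.extend(current)
--         # grams of length n+1: extend each gram by the token that follows it
--         current = [g + t for g, t in zip(current, tokens[n:])]
--     return result
-- ===== Notes on version B (the rewrite author's own statement) =====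
-- stated objective: alternative
-- what changed: Instead of re-slicing the token list and re-joining from scratch for every (n, i) pair, B keeps the current level of grams as running state and derives each next level in one zip pass by extending every gram with the token that follows it.
-- intended difference: For ngram_range with min_n <= 0 (and max_n != 1, min_n <= max_n) A pads the output with empty-string 'grams' from joins of empty or negative-length slices, one per position for each n <= 0; B emits only genuine n-grams of length >= 1, the intended behaviour since n-gram sizes start at 1 (as in scikit-learn). — e.g. on word_n_grams([], none, (0, 2)): A returns [""], B returns []
import Mathlib
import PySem

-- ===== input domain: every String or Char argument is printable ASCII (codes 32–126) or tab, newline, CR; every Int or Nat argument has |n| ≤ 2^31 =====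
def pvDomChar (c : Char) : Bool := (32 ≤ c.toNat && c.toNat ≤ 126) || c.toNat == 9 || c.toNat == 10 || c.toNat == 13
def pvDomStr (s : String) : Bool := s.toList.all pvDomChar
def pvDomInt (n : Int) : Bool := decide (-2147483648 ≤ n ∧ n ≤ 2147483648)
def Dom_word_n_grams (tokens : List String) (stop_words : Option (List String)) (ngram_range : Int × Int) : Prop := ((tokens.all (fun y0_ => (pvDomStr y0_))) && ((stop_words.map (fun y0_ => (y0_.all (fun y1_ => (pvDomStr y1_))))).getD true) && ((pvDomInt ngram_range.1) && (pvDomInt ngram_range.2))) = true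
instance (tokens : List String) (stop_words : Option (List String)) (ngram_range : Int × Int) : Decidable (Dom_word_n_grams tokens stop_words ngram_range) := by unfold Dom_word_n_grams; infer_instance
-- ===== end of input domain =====

-- B (alternative decomposition, not faster): each n-gram level is built by extending the
-- previous level's grams with the token that follows, instead of re-slicing and re-joining
-- the token list for every (n, i) pair; A = B is proved outside D_ (min_n ≤ 0), where A
-- pads the output with empty-string grams and B returns only the genuine n-grams.

-- ===== PORT A =====
def word_n_grams (tokens : List String) (stop_words : Option (List String)) (ngram_range : Int × Int) : List String :=
  -- handle stop words
  let tokens1 : List String :=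
    match stop_words with
    | some sw => tokens.filter (fun w => !(sw.contains w))
    | none => tokens
  -- handle token n-grams
  let min_n : Int := ngram_range.1
  let max_n : Int := ngram_range.2
  if max_n ≠ 1 then
    let original_tokens := tokens1
    let n_original_tokens : Int := original_tokens.length
    (PySem.List.pyRange min_n (min (max_n + 1) (n_original_tokens + 1))).foldl
      (fun toks n =>
        (PySem.List.pyRange 0 (n_original_tokens - n + 1)).foldl
          (fun toks i =>
            toks ++ [PySem.Str.join "" (PySem.List.slice original_tokens (some i) (some (i + n)))])
          toks)
      []
  else tokens1

-- ===== PORT B =====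
def word_n_grams_alt (tokens : List String) (stop_words : Option (List String)) (ngram_range : Int × Int) : List String :=
  -- handle stop words
  let tokens1 : List String :=
    match stop_words with
    | some sw => tokens.filter (fun w => !(sw.contains w))
    | none => tokens
  let min_n : Int := ngram_range.1
  let max_n : Int := ngram_range.2
  if max_n == 1 then tokens1
  else
    -- state: (result, current level of grams); current starts as the 1-grams
    ((PySem.List.pyRange 1 (min max_n (tokens1.length : Int) + 1)).foldl
      (fun st n =>
        ((if min_n ≤ n then st.1 ++ st.2 else st.1),
          (st.2.zip (PySem.List.slice tokens1 (some n) none)).map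
            (fun gt => String.ofList (gt.1.toList ++ gt.2.toList))))
      ([], tokens1)).1

-- ===== PRECONDITION & SPEC =====
-- For ngram_range with min_n ≤ 0 (and max_n ≠ 1, min_n ≤ max_n) A pads the output with
-- empty-string 'grams' from joins of empty or negative-length slices, one per position for
-- each n ≤ 0; B emits only genuine n-grams of length ≥ 1, the intended behaviour since
-- n-gram sizes start at 1 (as in scikit-learn).
def D_word_n_grams (tokens : List String) (stop_words : Option (List String)) (ngram_range : Int × Int) : Prop :=
  ngram_range.2 ≠ 1 ∧ ngram_range.1 ≤ 0 ∧ ngram_range.1 ≤ ngram_range.2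
instance (tokens : List String) (stop_words : Option (List String)) (ngram_range : Int × Int) : Decidable (D_word_n_grams tokens stop_words ngram_range) := by unfold D_word_n_grams; infer_instance

def Spec_word_n_grams (tokens : List String) (stop_words : Option (List String)) (ngram_range : Int × Int) (out : List String) : Prop := ¬ D_word_n_grams tokens stop_words ngram_range → out = word_n_grams_alt tokens stop_words ngram_range
instance (tokens : List String) (stop_words : Option (List String)) (ngram_range : Int × Int) (out : List String) : Decidable (Spec_word_n_grams tokens stop_words ngram_range out) := by unfold Spec_word_n_grams; infer_instance

def pvDiffWitness_word_n_grams : List String × Option (List String) × (Int × Int) := ([], none, (0, 2))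
def pvDiffWitnessOut_word_n_grams : (List String) × (List String) := ([""], [])

-- ===== CLAIM (what is proved, stated in full; the proofs are below) =====
def Claim_unchanged_word_n_grams : Prop := ∀ (tokens : List String) (stop_words : Option (List String)) (ngram_range : Int × Int), Dom_word_n_grams tokens stop_words ngram_range → Spec_word_n_grams tokens stop_words ngram_range (word_n_grams tokens stop_words ngram_range)
def Claim_changed_word_n_grams : Prop := Dom_word_n_grams (pvDiffWitness_word_n_grams.1) (pvDiffWitness_word_n_grams.2.1) (pvDiffWitness_word_n_grams.2.2) ∧ D_word_n_grams (pvDiffWitness_word_n_grams.1) (pvDiffWitness_word_n_grams.2.1) (pvDiffWitness_word_n_grams.2.2) ∧ word_n_grams (pvDiffWitness_word_n_grams.1) (pvDiffWitness_word_n_grams.2.1) (pvDiffWitness_word_n_grams.2.2) = pvDiffWitnessOut_word_n_grams.1 ∧ word_n_grams_alt (pvDiffWitness_word_n_grams.1) (pvDiffWitness_word_n_grams.2.1) (pvDiffWitness_word_n_grams.2.2) = pvDiffWitnessOut_word_n_grams.2 ∧ pvDiffWitnessOut_word_n_grams.1 ≠ pvDiffWitnessOut_word_n_grams.2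
def Claim_exact_word_n_grams : Prop := ∀ (tokens : List String) (stop_words : Option (List String)) (ngram_range : Int × Int), Dom_word_n_grams tokens stop_words ngram_range → D_word_n_grams tokens stop_words ngram_range → word_n_grams tokens stop_words ngram_range ≠ word_n_grams_alt tokens stop_words ngram_range

-- ===== LEMMAS AND PROOFS =====

-- ''.join with an empty separator is concatenation
theorem pvJoin_empty_sep (l : List (List Char)) : PySem.Chars.join [] l = l.flatten := by
  induction l with
  | nil => exact PySem.Chars.join_nil []
  | cons p rest ih =>
    cases rest with
    | nil => simp [PySem.Chars.join_singleton]
    | cons q r =>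
      rw [PySem.Chars.join_cons_cons, ih]
      simp

-- the list of all n-grams of length n, in position order ("level n")
def pvLevel (ts : List String) (n : Nat) : List String :=
  (List.range (ts.length + 1 - n)).map (fun i => PySem.Str.join "" ((ts.drop i).take n))

theorem pvLevel_one (ts : List String) : pvLevel ts 1 = ts := by
  unfold pvLevel
  apply List.ext_getElem
  · simp
  · intro i h1 h2
    simp only [List.getElem_map, List.getElem_range]
    have hd : ts.drop i = ts[i] :: ts.drop (i + 1) := List.drop_eq_getElem_cons h2
    apply String.toList_inj.mp
    rw [hd]
    simp only [List.take_succ_cons, List.take_zero, PySem.Str.toList_join, List.map_cons,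
      List.map_nil, PySem.Chars.join_singleton]

-- extending every gram of level n by the token that follows it gives level n+1
theorem pvLevel_step (ts : List String) (n : Nat) :
    ((pvLevel ts n).zip (ts.drop n)).map (fun gt => String.ofList (gt.1.toList ++ gt.2.toList))
      = pvLevel ts (n + 1) := by
  unfold pvLevel
  apply List.ext_getElem
  · simp; omega
  · intro i h1 h2
    simp only [List.getElem_map, List.getElem_zip, List.getElem_range, List.getElem_drop]
    have hlen : i < ts.length - n := by simp at h1; omega
    have hnd : n < (ts.drop i).length := by simp; omega
    have htake : (ts.drop i).take (n + 1) = (ts.drop i).take n ++ [ts[i + n]'(by omega)] := by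
      rw [List.take_add_one]
      congr 1
      rw [List.getElem?_eq_getElem hnd]
      simp [List.getElem_drop]
    apply String.toList_inj.mp
    rw [htake]
    simp only [PySem.Str.toList_join, String.toList_ofList, pvJoin_empty_sep,
      List.map_append, List.map_cons, List.map_nil, List.flatten_append, List.flatten_cons,
      List.flatten_nil, List.append_nil, String.toList_empty]
    simp only [Nat.add_comm n i]

-- invariant of B's loop: the state after level k is (emitted levels, level k+1)
theorem pvB_fold (ts : List String) (mn : Int) (k : Nat) :
    (PySem.List.pyRange 1 ((k : Int) + 1)).foldl
      (fun st n =>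
        ((if mn ≤ n then st.1 ++ st.2 else st.1),
          (st.2.zip (PySem.List.slice ts (some n) none)).map
            (fun gt => String.ofList (gt.1.toList ++ gt.2.toList))))
      ([], ts)
    = ((PySem.List.pyRange 1 ((k : Int) + 1)).flatMap
         (fun n => if mn ≤ n then pvLevel ts n.toNat else []),
       pvLevel ts (k + 1)) := by
  induction k with
  | zero =>
    rw [show ((0:Nat):Int) + 1 = 1 by norm_num, PySem.List.pyRange_one_eq_nil le_rfl]
    simp [pvLevel_one]
  | succ k ih =>
    have h1 : ((k+1:Nat):Int) = ((k:Nat):Int) + 1 := by push_cast; ring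
    rw [h1, PySem.List.pyRange_one_succ_right (by omega), List.foldl_append,
      List.flatMap_append, ih]
    simp only [List.foldl_cons, List.foldl_nil, List.flatMap_cons, List.flatMap_nil,
      List.append_nil]
    have hslice : PySem.List.slice ts (some ((k:Int)+1)) none = ts.drop (k+1) := by
      rw [show ((k:Int)+1) = ((k+1:Nat):Int) by push_cast; ring,
        PySem.List.slice_from ts (by omega)]
      simp
    have htn : ((k:Int)+1).toNat = k + 1 := by omega
    rw [hslice, htn, pvLevel_step]
    split_ifs <;> simp

-- one inner pass of A is exactly level n (for genuine lengths 1 ≤ n ≤ len)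
theorem pvG_eq (ts : List String) (n : Int) (h1 : 1 ≤ n) (h2 : n ≤ (ts.length : Int)) :
    (PySem.List.pyRange 0 ((ts.length : Int) - n + 1)).map
      (fun i => PySem.Str.join "" (PySem.List.slice ts (some i) (some (i + n))))
    = pvLevel ts n.toNat := by
  rw [show (ts.length : Int) - n + 1 = ((ts.length + 1 - n.toNat : Nat) : Int) by omega,
    PySem.List.pyRange_zero_natCast, List.map_map]
  apply List.map_congr_left
  intro i _
  simp only [Function.comp_apply]
  rw [show ((i:Int) + n) = ((i + n.toNat : Nat) : Int) by omega,
    PySem.List.slice_natCast, show i + n.toNat - i = n.toNat from by omega]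

-- A's nested fold as a flatMap over the outer range
theorem pvA_form (ts : List String) (mn mx : Int) :
    (PySem.List.pyRange mn (min (mx + 1) ((ts.length : Int) + 1))).foldl
      (fun toks n =>
        (PySem.List.pyRange 0 ((ts.length : Int) - n + 1)).foldl
          (fun toks i =>
            toks ++ [PySem.Str.join "" (PySem.List.slice ts (some i) (some (i + n)))])
          toks)
      []
    = (PySem.List.pyRange mn (min (mx + 1) ((ts.length : Int) + 1))).flatMap
        (fun n => (PySem.List.pyRange 0 ((ts.length : Int) - n + 1)).map
          (fun i => PySem.Str.join "" (PySem.List.slice ts (some i) (some (i + n))))) := by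
  simp only [PySem.List.foldl_append_singleton_eq_map, PySem.List.foldl_append_eq_flatMap,
    List.nil_append]

-- B's fold result as a flatMap of levels, min_n filtering each level
theorem pvB_form (ts : List String) (mn mx : Int) :
    ((PySem.List.pyRange 1 (min mx ((ts.length : Int)) + 1)).foldl
        (fun st n =>
          ((if mn ≤ n then st.1 ++ st.2 else st.1),
            (st.2.zip (PySem.List.slice ts (some n) none)).map
              (fun gt => String.ofList (gt.1.toList ++ gt.2.toList))))
        ([], ts)).1
    = (PySem.List.pyRange 1 (min mx ((ts.length : Int)) + 1)).flatMap
        (fun n => if mn ≤ n then pvLevel ts n.toNat else []) := by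
  by_cases hM : min mx ((ts.length : Int)) < 1
  · rw [PySem.List.pyRange_one_eq_nil (show min mx ((ts.length : Int)) + 1 ≤ 1 by omega)]
    simp
  · obtain ⟨k, hk⟩ : ∃ k : Nat, min mx ((ts.length : Int)) = (k : Int) :=
      ⟨(min mx ((ts.length : Int))).toNat, by omega⟩
    rw [hk, pvB_fold]

theorem pvGramsEq (ts : List String) (mn mx : Int) (h : 1 ≤ mn ∨ mx < mn) :
    (PySem.List.pyRange mn (min (mx + 1) ((ts.length : Int) + 1))).foldl
      (fun toks n =>
        (PySem.List.pyRange 0 ((ts.length : Int) - n + 1)).foldl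
          (fun toks i =>
            toks ++ [PySem.Str.join "" (PySem.List.slice ts (some i) (some (i + n)))])
          toks)
      []
    = ((PySem.List.pyRange 1 (min mx ((ts.length : Int)) + 1)).foldl
        (fun st n =>
          ((if mn ≤ n then st.1 ++ st.2 else st.1),
            (st.2.zip (PySem.List.slice ts (some n) none)).map
              (fun gt => String.ofList (gt.1.toList ++ gt.2.toList))))
        ([], ts)).1 := by
  rw [pvA_form, pvB_form]
  by_cases hM : min mx ((ts.length : Int)) < 1
  · rw [PySem.List.pyRange_one_eq_nil (show min (mx + 1) ((ts.length : Int) + 1) ≤ mn by omega),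
      PySem.List.pyRange_one_eq_nil (show min mx ((ts.length : Int)) + 1 ≤ 1 by omega)]
    simp
  · have hmn : 1 ≤ mn := by omega
    obtain ⟨k, hk⟩ : ∃ k : Nat, min mx ((ts.length : Int)) = (k : Int) :=
      ⟨(min mx ((ts.length : Int))).toNat, by omega⟩
    have hk1 : 1 ≤ (k : Int) := by omega
    have hkL : (k : Int) ≤ (ts.length : Int) := by omega
    rw [show min (mx + 1) ((ts.length : Int) + 1) = (k : Int) + 1 by omega, hk]
    by_cases hbig : (k : Int) + 1 ≤ mn
    · rw [PySem.List.pyRange_one_eq_nil hbig]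
      simp only [List.flatMap_nil]
      rw [List.flatMap_eq_nil_iff.mpr]
      intro n hn
      rw [PySem.List.mem_pyRange_one] at hn
      rw [if_neg (by omega)]
    · rw [PySem.List.pyRange_one_append 1 mn ((k : Int) + 1) hmn (by omega),
        List.flatMap_append]
      have hfirst : (PySem.List.pyRange 1 mn).flatMap
          (fun n => if mn ≤ n then pvLevel ts n.toNat else []) = [] := by
        rw [List.flatMap_eq_nil_iff.mpr]
        intro n hn
        rw [PySem.List.mem_pyRange_one] at hn
        rw [if_neg (by omega)]
      rw [hfirst, List.nil_append]
      apply List.flatMap_congr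
      intro n hn
      rw [PySem.List.mem_pyRange_one] at hn
      rw [if_pos (by omega), pvG_eq ts n (by omega) (by omega)]

-- inside D_: A's output is strictly longer than B's (the n ≤ 0 blocks), so they differ
theorem pvGramsNe (ts : List String) (mn mx : Int) (hmn : mn ≤ 0)
    (hle : mn ≤ mx) :
    (PySem.List.pyRange mn (min (mx + 1) ((ts.length : Int) + 1))).foldl
      (fun toks n =>
        (PySem.List.pyRange 0 ((ts.length : Int) - n + 1)).foldl
          (fun toks i =>
            toks ++ [PySem.Str.join "" (PySem.List.slice ts (some i) (some (i + n)))])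
          toks)
      []
    ≠ ((PySem.List.pyRange 1 (min mx ((ts.length : Int)) + 1)).foldl
        (fun st n =>
          ((if mn ≤ n then st.1 ++ st.2 else st.1),
            (st.2.zip (PySem.List.slice ts (some n) none)).map
              (fun gt => String.ofList (gt.1.toList ++ gt.2.toList))))
        ([], ts)).1 := by
  rw [pvA_form, pvB_form]
  have hAne : mn < min (mx + 1) ((ts.length : Int) + 1) := by omega
  have hhead : PySem.List.pyRange mn (min (mx + 1) ((ts.length : Int) + 1))
      = mn :: PySem.List.pyRange (mn + 1) (min (mx + 1) ((ts.length : Int) + 1)) :=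
    PySem.List.pyRange_one_cons hAne
  have hinner : PySem.List.pyRange 0 ((ts.length : Int) - mn + 1)
      = 0 :: PySem.List.pyRange 1 ((ts.length : Int) - mn + 1) := by
    have := PySem.List.pyRange_one_cons (show (0:Int) < (ts.length : Int) - mn + 1 by omega)
    simpa using this
  by_cases hM : min mx ((ts.length : Int)) < 1
  · rw [PySem.List.pyRange_one_eq_nil (show min mx ((ts.length : Int)) + 1 ≤ 1 by omega)]
    rw [hhead]
    simp [hinner]
  · obtain ⟨k, hk⟩ : ∃ k : Nat, min mx ((ts.length : Int)) = (k : Int) :=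
      ⟨(min mx ((ts.length : Int))).toNat, by omega⟩
    have hk1 : 1 ≤ (k : Int) := by omega
    have hkL : (k : Int) ≤ (ts.length : Int) := by omega
    rw [show min (mx + 1) ((ts.length : Int) + 1) = (k : Int) + 1 by omega, hk]
    rw [PySem.List.pyRange_one_append mn 1 ((k : Int) + 1) (by omega) (by omega),
      List.flatMap_append]
    have hsecond : (PySem.List.pyRange 1 ((k : Int) + 1)).flatMap
        (fun n => (PySem.List.pyRange 0 ((ts.length : Int) - n + 1)).map
          (fun i => PySem.Str.join "" (PySem.List.slice ts (some i) (some (i + n)))))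
        = (PySem.List.pyRange 1 ((k : Int) + 1)).flatMap
            (fun n => if mn ≤ n then pvLevel ts n.toNat else []) := by
      apply List.flatMap_congr
      intro n hn
      rw [PySem.List.mem_pyRange_one] at hn
      rw [if_pos (by omega), pvG_eq ts n (by omega) (by omega)]
    rw [hsecond]
    intro heq
    have hlen := congrArg List.length heq
    rw [List.length_append] at hlen
    have hfz : ((PySem.List.pyRange mn 1).flatMap
        (fun n => (PySem.List.pyRange 0 ((ts.length : Int) - n + 1)).map
          (fun i => PySem.Str.join "" (PySem.List.slice ts (some i) (some (i + n)))))).length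
        = 0 := by omega
    rw [PySem.List.pyRange_one_cons (show mn < 1 by omega)] at hfz
    rw [List.flatMap_cons, List.length_append, List.length_map, hinner] at hfz
    simp at hfz

-- ===== VERDICT (by name: the statement is the Claim_ definition above) =====
theorem word_n_grams_spec : Claim_unchanged_word_n_grams := by
  intro tokens stop_words ngram_range hdom hnd
  obtain ⟨mn, mx⟩ := ngram_range
  unfold D_word_n_grams at hnd
  simp only [ne_eq, not_and, not_le] at hnd
  unfold word_n_grams word_n_grams_alt
  by_cases hmx : mx = 1
  · subst hmx
    simp
  · have h : 1 ≤ mn ∨ mx < mn := by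
      by_cases hm : mn ≤ 0
      · exact Or.inr (hnd hmx hm)
      · exact Or.inl (by omega)
    cases stop_words with
    | none => simpa [hmx] using pvGramsEq tokens mn mx h
    | some sw => simpa [hmx] using pvGramsEq (tokens.filter (fun w => !(sw.contains w))) mn mx h

theorem word_n_grams_changed : Claim_changed_word_n_grams := by
  unfold Claim_changed_word_n_grams; decide

theorem word_n_grams_tight : Claim_exact_word_n_grams := by
  intro tokens stop_words ngram_range hdom hD
  obtain ⟨mn, mx⟩ := ngram_range
  obtain ⟨hmx, hmn, hle⟩ := hD
  unfold word_n_grams word_n_grams_alt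
  cases stop_words with
  | none => simpa [hmx] using pvGramsNe tokens mn mx hmn hle
  | some sw => simpa [hmx] using pvGramsNe (tokens.filter (fun w => !(sw.contains w))) mn mx hmn hle
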